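-- pv_equiv track=rewrite | github.com/ffekirnew/a2sv-competitive-programming | code-forces/planets.py | min_cost_destroy_planets
-- ===== SOURCE A (Python) =====
-- from collections import Counter
--
-- def min_cost_destroy_planets(cost, planets):
--     total_cost = 0
--     orbits = Counter(planets)
--     for num_planets in orbits.values():
--         if num_planets > 1:
--             if cost < num_planets:
--                 total_cost += cost
--             else:
--                 total_cost += num_planets
--         else:
--             total_cost += 1
--     return total_cost
-- ===== SOURCE B (Python) =====
-- def min_cost_destroy_planets(cost, planets):
--     s = sorted(planets)
--     total = 0
--     i = 0
--     while i < len(s):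
--         j = i + 1
--         while j < len(s) and s[j] == s[i]:
--             j += 1
--         c = j - i
--         total += 1 if c == 1 else min(cost, c)
--         i = j
--     return total
-- ===== Notes on version B (the rewrite author's own statement) =====
-- stated objective: alternative
-- what changed: Replaces the Counter hash tally plus a loop over its values by sorting a copy of the list and summing per-run costs in one run-length scan over the sorted data.
import Mathlib
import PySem

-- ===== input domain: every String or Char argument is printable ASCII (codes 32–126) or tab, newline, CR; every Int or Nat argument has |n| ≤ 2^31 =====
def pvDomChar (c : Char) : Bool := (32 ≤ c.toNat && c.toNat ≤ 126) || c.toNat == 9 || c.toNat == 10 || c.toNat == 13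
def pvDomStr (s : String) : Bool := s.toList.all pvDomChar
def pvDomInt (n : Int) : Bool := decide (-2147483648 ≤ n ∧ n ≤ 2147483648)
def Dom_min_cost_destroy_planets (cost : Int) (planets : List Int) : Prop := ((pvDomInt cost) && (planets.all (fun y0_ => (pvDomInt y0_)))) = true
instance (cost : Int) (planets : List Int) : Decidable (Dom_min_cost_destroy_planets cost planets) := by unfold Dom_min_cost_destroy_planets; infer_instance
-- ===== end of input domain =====

-- B replaces A's Counter tally by sorting a copy and summing per-run costs in one run-length scan (alternative decomposition; return value only, neither mutates its argument).

-- ===== PORT A =====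
def min_cost_destroy_planets (cost : Int) (planets : List Int) : Int :=
  let total_cost : Int := 0
  let orbits := PySem.Dict.counter planets
  orbits.values.foldl (fun total_cost num_planets =>
    if num_planets > 1 then
      if cost < num_planets then total_cost + cost else total_cost + num_planets
    else total_cost + 1) total_cost

-- ===== PORT B =====
-- the outer while loop of Source B: consume one run (head + leading equal elements) per step
def pvRunSum (cost : Int) : List Int → Int
  | [] => 0
  | x :: rest =>
      let c : Int := 1 + (rest.takeWhile (fun y => y == x)).length
      (if c == 1 then 1 else min cost c) + pvRunSum cost (rest.dropWhile (fun y => y == x))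
termination_by s => s.length
decreasing_by
  simpa using Nat.lt_succ_of_le (List.length_dropWhile_le _ _)

def min_cost_destroy_planets_alt (cost : Int) (planets : List Int) : Int :=
  pvRunSum cost (PySem.List.sorted planets (fun x => x) false)

-- ===== PRECONDITION & SPEC =====
def Spec_min_cost_destroy_planets (cost : Int) (planets : List Int) (out : Int) : Prop := out = min_cost_destroy_planets_alt cost planets
instance (cost : Int) (planets : List Int) (out : Int) : Decidable (Spec_min_cost_destroy_planets cost planets out) := by unfold Spec_min_cost_destroy_planets; infer_instance

-- ===== CLAIM (what is proved, stated in full; the proofs are below) =====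
def Claim_equal_min_cost_destroy_planets : Prop := ∀ (cost : Int) (planets : List Int), Dom_min_cost_destroy_planets cost planets → Spec_min_cost_destroy_planets cost planets (min_cost_destroy_planets cost planets)

-- ===== LEMMAS AND PROOFS =====

-- the per-group contribution both programs add, as a function of the group size
def pvG (cost c : Int) : Int := if c = 1 then 1 else min cost c

lemma pvA_foldl_eq (cost a : Int) (l : List Int) (h : ∀ c ∈ l, 1 ≤ c) :
    l.foldl (fun acc c =>
      if c > 1 then (if cost < c then acc + cost else acc + c) else acc + 1) a
      = a + (l.map (pvG cost)).sum := by
  induction l generalizing a with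
  | nil => simp
  | cons c t ih =>
    have hc : (1 : Int) ≤ c := h c (by simp)
    have ht : ∀ x ∈ t, (1 : Int) ≤ x := fun x hx => h x (by simp [hx])
    simp only [List.foldl_cons, List.map_cons, List.sum_cons, ih _ ht]
    have : (if c > 1 then (if cost < c then a + cost else a + c) else a + 1)
        = a + pvG cost c := by
      unfold pvG
      rcases lt_or_ge 1 c with h1 | h1
      · have : c ≠ 1 := by omega
        simp only [if_pos h1, if_neg this, min_def]
        split_ifs <;> omega
      · have : c = 1 := by omega
        simp [this]
    rw [this]; ring

lemma pvA_eq_finset_sum (cost : Int) (planets : List Int) :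
    min_cost_destroy_planets cost planets
      = ∑ k ∈ planets.toFinset, pvG cost (planets.count k : Int) := by
  unfold min_cost_destroy_planets
  have hv : (PySem.Dict.counter planets).values
      = (PySem.Set.ofList planets).map (fun k => (planets.count k : Int)) := by
    show ((PySem.Dict.counter planets).items.map Prod.snd) = _
    rw [PySem.Dict.items_counter, List.map_map]
    rfl
  simp only [hv]
  rw [pvA_foldl_eq]
  · rw [zero_add, List.map_map]
    have hnd : (PySem.Set.ofList planets).Nodup := PySem.Set.nodup_ofList planets
    rw [← List.sum_toFinset _ hnd]
    apply Finset.sum_congr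
    · ext k
      simp [List.mem_toFinset, PySem.Set.mem_ofList]
    · intro k _; rfl
  · intro c hc
    rcases List.mem_map.mp hc with ⟨k, hk, rfl⟩
    have : k ∈ planets := (PySem.Set.mem_ofList _ _).mp hk
    have := List.count_pos_iff.mpr this
    omega

lemma pv_not_mem_dropWhile (x : Int) (l : List Int) (hp : l.Pairwise (· ≤ ·))
    (hle : ∀ y ∈ l, x ≤ y) : x ∉ l.dropWhile (fun y => y == x) := by
  induction l with
  | nil => simp
  | cons z tl ih =>
    rcases List.pairwise_cons.mp hp with ⟨hz, htl⟩
    by_cases h : (z == x) = true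
    · simp only [List.dropWhile_cons]
      rw [if_pos h]
      exact ih htl (fun y hy => hle y (by simp [hy]))
    · simp only [List.dropWhile_cons]
      rw [if_neg h]
      have hzx : z ≠ x := by simpa using h
      intro hmem
      rcases List.mem_cons.mp hmem with h1 | h1
      · exact hzx h1.symm
      · have h2 : z ≤ x := hz x h1
        have h3 : x ≤ z := hle z (by simp)
        exact hzx (le_antisymm h2 h3)

lemma pvRunSum_eq_finset_sum (cost : Int) :
    ∀ s : List Int, s.Pairwise (· ≤ ·) →
      pvRunSum cost s = ∑ k ∈ s.toFinset, pvG cost (s.count k : Int)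
  | [], _ => by simp [pvRunSum]
  | x :: rest, hp => by
    have hle : ∀ y ∈ rest, x ≤ y := (List.pairwise_cons.mp hp).1
    have hrest : rest.Pairwise (· ≤ ·) := (List.pairwise_cons.mp hp).2
    set t := rest.takeWhile (fun y => y == x) with ht
    set d := rest.dropWhile (fun y => y == x) with hd
    have htd : t ++ d = rest := List.takeWhile_append_dropWhile ..
    have htx : ∀ y ∈ t, y = x := by
      intro y hy
      have := List.mem_takeWhile_imp hy
      simpa using this
    have hdp : d.Pairwise (· ≤ ·) := hrest.sublist (List.dropWhile_sublist _)
    have hxd : x ∉ d := hd ▸ pv_not_mem_dropWhile x rest hrest hle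
    have hcx : (x :: rest).count x = 1 + t.length := by
      have h1 : t.count x = t.length :=
        List.count_eq_length.mpr (fun b hb => (htx b hb).symm)
      have h2 : d.count x = 0 := List.count_eq_zero.mpr hxd
      rw [List.count_cons_self, ← htd, List.count_append, h1, h2]
      omega
    have hck : ∀ k ∈ d, (x :: rest).count k = d.count k := by
      intro k hk
      have hkx : k ≠ x := fun h => hxd (h ▸ hk)
      have h1 : t.count k = 0 :=
        List.count_eq_zero.mpr (fun h => hkx (htx k h))
      rw [← htd, List.count_cons, List.count_append, h1, if_neg (by simpa using Ne.symm hkx)]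
      omega
    have hfs : (x :: rest).toFinset = insert x d.toFinset := by
      ext k
      simp only [List.toFinset_cons, ← htd, List.toFinset_append, Finset.mem_insert,
        Finset.mem_union, List.mem_toFinset]
      constructor
      · rintro (h | h | h)
        · exact Or.inl h
        · exact Or.inl (htx k h)
        · exact Or.inr h
      · rintro (h | h)
        · exact Or.inl h
        · exact Or.inr (Or.inr h)
    have ih := pvRunSum_eq_finset_sum cost d hdp
    rw [pvRunSum, ← ht, ← hd, ih, hfs,
      Finset.sum_insert (by simpa using hxd)]
    have hgoal1 : (if (1 + (t.length : Int)) == 1 then (1 : Int)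
        else min cost (1 + (t.length : Int)))
        = pvG cost (((x :: rest).count x : Int)) := by
      unfold pvG
      rw [hcx]
      push_cast
      by_cases h0 : (t.length : Int) = 0
      · simp [h0]
      · have e1 : (1 : Int) + (t.length : Int) ≠ 1 := by omega
        rw [if_neg (by simp only [beq_iff_eq]; exact e1), if_neg e1]
    rw [hgoal1]
    congr 1
    apply Finset.sum_congr rfl
    intro k hk
    rw [hck k (List.mem_toFinset.mp hk)]
termination_by s => s.length
decreasing_by
  simpa using Nat.lt_succ_of_le (List.length_dropWhile_le _ _)

-- ===== VERDICT (by name: the statement is the Claim_ definition above) =====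
theorem min_cost_destroy_planets_spec : Claim_equal_min_cost_destroy_planets := by
  intro cost planets _
  show min_cost_destroy_planets cost planets = min_cost_destroy_planets_alt cost planets
  unfold min_cost_destroy_planets_alt
  have hperm : (PySem.List.sorted planets (fun x => x) false).Perm planets :=
    PySem.List.sorted_perm ..
  have hsorted : (PySem.List.sorted planets (fun x => x) false).Pairwise (· ≤ ·) := by
    simpa using PySem.List.sorted_pairwise planets (fun x => x)
  have hfs : (PySem.List.sorted planets (fun x => x) false).toFinset = planets.toFinset := by
    ext k; simp [List.mem_toFinset, hperm.mem_iff]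
  rw [pvA_eq_finset_sum, pvRunSum_eq_finset_sum cost _ hsorted, hfs]
  apply Finset.sum_congr rfl
  intro k _
  rw [hperm.count_eq]
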